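-- pv_equiv track=rewrite | github.com/droe-lang/droe | compiler/parser.py | _is_complete_quoted_string
-- ===== SOURCE A (Python) =====
-- def _is_complete_quoted_string(expr_str: str) -> bool:
--     """Check if the expression is a complete quoted string (not a concatenation with quotes)."""
--     if not ((expr_str.startswith('"') and expr_str.endswith('"')) or
--             (expr_str.startswith("'") and expr_str.endswith("'"))):
--         return False
--
--     # Check if there are unescaped quotes in the middle that would indicate concatenation
--     quote_char = expr_str[0]
--     inside_content = expr_str[1:-1]
--
--     # If the string is properly quoted at start and end, and there are no unescaped
--     # quotes inside, then it's a complete quoted string regardless of operators inside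
--     # The + operators inside the quotes are part of the string content, not concatenation
--
--     # Check for unescaped quotes inside
--     i = 0
--     while i < len(inside_content):
--         if inside_content[i] == quote_char:
--             # Check if it's escaped
--             if i > 0 and inside_content[i-1] == '\\':
--                 # It's escaped, continue
--                 i += 1
--                 continue
--             else:
--                 # Unescaped quote found inside, this is not a simple string
--                 return False
--         i += 1
--
--     return True
-- ===== SOURCE B (Python) =====
-- def _is_complete_quoted_string(expr_str: str) -> bool:
--     """Check if the expression is a complete quoted string (not a concatenation with quotes)."""
--     if not ((expr_str.startswith('"') and expr_str.endswith('"')) or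
--             (expr_str.startswith("'") and expr_str.endswith("'"))):
--         return False
--     quote_char = expr_str[0]
--     # Split the inner content on the quote character: every inner occurrence of the
--     # quote starts a new part, and it was escaped exactly when the part before it
--     # ends with a backslash.
--     parts = expr_str[1:-1].split(quote_char)
--     return all(part.endswith('\\') for part in parts[:-1])
-- ===== Notes on version B (the rewrite author's own statement) =====
-- stated objective: simpler
-- what changed: Replaces A's manual index-based while loop scanning for an unescaped inner quote with a split of the inner content on the quote character plus a check that every part except the last ends with a backslash.
import Mathlib
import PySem

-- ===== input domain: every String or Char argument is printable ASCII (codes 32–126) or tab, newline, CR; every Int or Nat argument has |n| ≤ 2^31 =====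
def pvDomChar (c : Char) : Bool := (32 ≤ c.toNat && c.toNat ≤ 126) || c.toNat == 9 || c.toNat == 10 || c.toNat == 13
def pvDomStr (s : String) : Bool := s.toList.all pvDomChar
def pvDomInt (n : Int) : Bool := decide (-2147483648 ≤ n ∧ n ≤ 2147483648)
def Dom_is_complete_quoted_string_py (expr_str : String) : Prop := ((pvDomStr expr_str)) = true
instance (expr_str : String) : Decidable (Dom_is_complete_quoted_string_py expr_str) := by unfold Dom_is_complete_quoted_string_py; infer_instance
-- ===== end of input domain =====

-- B replaces A's index-based scan for an unescaped inner quote by splitting the inner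
-- content on the quote character and requiring every part but the last to end in a
-- backslash (objective: simpler). Exact equivalence, proved for all strings.

-- ===== PORT A =====
-- A's while loop over indices of inside_content
def pvLoopA (inside : List Char) (q : Char) (i : Nat) : Bool :=
  if h : i < inside.length then
    if inside[i] == q then
      if decide (0 < i) && (PySem.List.pyGetD inside ((i : Int) - 1) ' ' == '\\') then
        pvLoopA inside q (i + 1)
      else
        false
    else
      pvLoopA inside q (i + 1)
  else
    true
termination_by inside.length - i

def is_complete_quoted_string_py (expr_str : String) : Bool :=
  if !((PySem.Str.startswith expr_str "\"" && PySem.Str.endswith expr_str "\"") ||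
       (PySem.Str.startswith expr_str "'" && PySem.Str.endswith expr_str "'")) then
    false
  else
    let cs := expr_str.toList
    let quote_char := cs.headD ' '   -- expr_str[0]; the guard guarantees the string is nonempty
    let inside_content := PySem.List.slice cs (some 1) (some (-1))   -- expr_str[1:-1]
    pvLoopA inside_content quote_char 0

-- ===== PORT B =====
def is_complete_quoted_string_py_alt (expr_str : String) : Bool :=
  if !((PySem.Str.startswith expr_str "\"" && PySem.Str.endswith expr_str "\"") ||
       (PySem.Str.startswith expr_str "'" && PySem.Str.endswith expr_str "'")) then
    false
  else
    let cs := expr_str.toList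
    let quote_char := cs.headD ' '   -- expr_str[0]; the guard guarantees the string is nonempty
    let parts := (PySem.List.slice cs (some 1) (some (-1))).splitOn quote_char   -- expr_str[1:-1].split(quote_char)
    (PySem.List.slice parts none (some (-1))).all (fun p => PySem.Chars.endswith p ['\\'])   -- all(p.endswith('\\') for p in parts[:-1])

-- ===== PRECONDITION & SPEC =====
def Spec_is_complete_quoted_string_py (expr_str : String) (out : Bool) : Prop := out = is_complete_quoted_string_py_alt expr_str
instance (expr_str : String) (out : Bool) : Decidable (Spec_is_complete_quoted_string_py expr_str out) := by unfold Spec_is_complete_quoted_string_py; infer_instance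

-- ===== CLAIM (what is proved, stated in full; the proofs are below) =====
def Claim_equal_is_complete_quoted_string_py : Prop := ∀ (expr_str : String), Dom_is_complete_quoted_string_py expr_str → Spec_is_complete_quoted_string_py expr_str (is_complete_quoted_string_py expr_str)

-- ===== LEMMAS AND PROOFS =====

-- structural version of A's scan: the Bool is "the previous character was a backslash"
-- (false at the start of the string)
def pvG (q : Char) (pb : Bool) : List Char → Bool
  | [] => true
  | c :: cs => if c == q then (if pb then pvG q (c == '\\') cs else false) else pvG q (c == '\\') cs

-- the check A performs at a quote occurrence, expressed on the part before it:
-- for an empty part the verdict is the incoming "previous char was a backslash" flag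
def pvH (pb : Bool) : List Char → Bool
  | [] => pb
  | c :: cs => ((c :: cs).getLast? == some '\\')

-- A's scan reorganised along the split parts
def pvF (q : Char) (pb : Bool) : List (List Char) → Bool
  | [] => true
  | [_] => true
  | p :: p' :: ps => pvH pb p && pvF q (q == '\\') (p' :: ps)

theorem pv_splitOn_cons (c q : Char) (cs : List Char) :
    (c :: cs).splitOn q = if c == q then [] :: cs.splitOn q else (cs.splitOn q).modifyHead (List.cons c) := by
  simp [List.splitOn, List.splitOnP_cons]

theorem pv_splitOn_ne_nil (l : List Char) (q : Char) : l.splitOn q ≠ [] := by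
  induction l with
  | nil => simp [List.splitOn]
  | cons c cs ih =>
    simp only [List.splitOn, List.splitOnP_cons] at *
    split
    · simp
    · cases h : List.splitOnP (fun x => x == q) cs <;> simp_all

theorem pv_splitOn_not_mem (l : List Char) (q : Char) :
    ∀ p ∈ l.splitOn q, q ∉ p := by
  induction l with
  | nil => simp
  | cons c cs ih =>
    intro p hp
    rw [pv_splitOn_cons] at hp
    by_cases hc : c == q
    · simp only [hc, if_true, List.mem_cons] at hp
      rcases hp with rfl | hp
      · simp
      · exact ih p hp
    · simp only [hc] at hp
      cases hsp : cs.splitOn q with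
      | nil => exact absurd hsp (pv_splitOn_ne_nil cs q)
      | cons p0 ps =>
        rw [hsp] at hp
        simp only [List.modifyHead_cons] at hp
        rcases List.mem_cons.1 hp with rfl | hp
        · intro hmem
          rcases List.mem_cons.1 hmem with rfl | hmem'
          · simp at hc
          · exact ih p0 (hsp ▸ List.mem_cons_self) hmem'
        · exact ih p (hsp ▸ List.mem_cons_of_mem p0 hp)

theorem pvH_cons (pb : Bool) (c : Char) (p : List Char) :
    pvH pb (c :: p) = pvH (c == '\\') p := by
  cases p with
  | nil => simp [pvH]
  | cons d p' => simp [pvH]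

-- A's index loop equals the structural scan pvG
theorem pvLoopA_eq_pvG (n : Nat) : ∀ (cs : List Char) (q : Char) (i : Nat), cs.length - i = n →
    pvLoopA cs q i = pvG q (decide (0 < i) && (PySem.List.pyGetD cs ((i : Int) - 1) ' ' == '\\')) (cs.drop i) := by
  induction n with
  | zero =>
    intro cs q i hn
    have hi : ¬ i < cs.length := by omega
    have hle : cs.length ≤ i := by omega
    rw [pvLoopA]
    simp [hi, List.drop_eq_nil_of_le hle, pvG]
  | succ n ih =>
    intro cs q i hn
    have hi : i < cs.length := by omega
    have hdrop : cs.drop i = cs[i] :: cs.drop (i + 1) := List.drop_eq_getElem_cons hi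
    have hget : PySem.List.pyGetD cs ((((i : Nat) + 1 : Nat) : Int) - 1) ' ' = cs[i] := by
      have h1 : ((((i : Nat) + 1 : Nat) : Int) - 1) = (i : Int) := by push_cast; ring
      rw [h1]
      simp [PySem.List.pyGetD_natCast, List.getD_eq_getElem?_getD, hi]
    have hrec := ih cs q (i + 1) (by omega)
    rw [hget] at hrec
    rw [pvLoopA, hdrop]
    simp only [hi, dif_pos, pvG]
    by_cases hc : cs[i] == q
    · simp only [hc, if_true]
      by_cases hpb : decide (0 < i) && (PySem.List.pyGetD cs ((i : Int) - 1) ' ' == '\\')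
      · simp only [hpb, if_true]
        rw [hrec]
        simp
      · simp only [Bool.not_eq_true] at hpb
        simp [hpb]
    · simp only [hc]
      rw [hrec]
      simp

-- the structural scan equals pvF over the split parts
theorem pvG_eq_pvF (l : List Char) : ∀ (q : Char) (pb : Bool),
    pvG q pb l = pvF q pb (l.splitOn q) := by
  induction l with
  | nil => intro q pb; simp [pvG, pvF]
  | cons c cs ih =>
    intro q pb
    rw [pv_splitOn_cons]
    by_cases hc : c == q
    · have hcq : c = q := by simpa using hc
      subst hcq
      cases hsp : cs.splitOn c with
      | nil => exact absurd hsp (pv_splitOn_ne_nil cs c)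
      | cons p0 ps =>
        have hih := ih c (c == '\\')
        rw [hsp] at hih
        cases pb with
        | false => simp [pvG, pvF, pvH]
        | true => simp [pvG, pvF, pvH, hih]
    · simp only [hc, pvG]
      cases hsp : cs.splitOn q with
      | nil => exact absurd hsp (pv_splitOn_ne_nil cs q)
      | cons p0 ps =>
        have := ih q (c == '\\')
        rw [hsp] at this
        rw [this, List.modifyHead_cons]
        cases ps with
        | nil => simp [pvF]
        | cons p1 ps' => simp [pvF, pvH_cons]

-- pvF at pb = false is exactly B's all-but-last endswith-backslash check
theorem pvF_false_eq_all (q : Char) : ∀ (parts : List (List Char)),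
    (∀ p ∈ parts, q ∉ p) →
    pvF q false parts = parts.dropLast.all (fun p => p.getLast? == some '\\') := by
  intro parts
  induction parts with
  | nil => intro _; simp [pvF]
  | cons p ps ih =>
    intro hmem
    cases ps with
    | nil => simp [pvF]
    | cons p1 ps' =>
      have hH : pvH false p = (p.getLast? == some '\\') := by
        cases p <;> simp [pvH]
      simp only [pvF, hH, List.dropLast_cons₂, List.all_cons]
      by_cases hq : q = '\\'
      · have hnot : ('\\' : Char) ∉ p := hq ▸ hmem p List.mem_cons_self
        have hlast : (p.getLast? == some '\\') = false := by
          cases hp : p.getLast? with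
          | none => simp
          | some d =>
            have hd : d ∈ p := List.mem_of_getLast? hp
            by_cases hdb : d = '\\'
            · exact absurd (hdb ▸ hd) hnot
            · simp [hdb]
        simp [hlast]
      · have hq' : (q == '\\') = false := by simp [hq]
        rw [hq', ih (fun p' hp' => hmem p' (List.mem_cons_of_mem p hp'))]

theorem endswith_bs_suffix (l : List Char) (a : Char) : (['\\'] <:+ (l ++ [a])) ↔ a = '\\' := by
  rw [List.suffix_concat_iff]
  constructor
  · rintro (h | ⟨t, ht, -⟩)
    · simp at h
    · cases t with
      | nil => simpa using ht.symm
      | cons c ts => simp at ht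
  · rintro rfl; exact Or.inr ⟨[], rfl, List.nil_suffix⟩

theorem endswith_bs (p : List Char) : (PySem.Chars.endswith p ['\\']) = (p.getLast? == some '\\') := by
  induction p using List.reverseRecOn with
  | nil => simp [PySem.Chars.endswith]
  | append_singleton l a ih =>
    rw [Bool.eq_iff_iff, PySem.Chars.endswith_iff, endswith_bs_suffix]
    simp

theorem pvLoopA_eq_split_check (l : List Char) (q : Char) :
    pvLoopA l q 0 = (l.splitOn q).dropLast.all (fun p => PySem.Chars.endswith p ['\\']) := by
  have h0 := pvLoopA_eq_pvG (l.length - 0) l q 0 rfl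
  simp only [List.drop_zero, Nat.lt_irrefl, decide_false, Bool.false_and] at h0
  rw [h0, pvG_eq_pvF, pvF_false_eq_all q _ (pv_splitOn_not_mem l q)]
  simp only [endswith_bs]

-- ===== VERDICT (by name: the statement is the Claim_ definition above) =====
theorem is_complete_quoted_string_py_spec : Claim_equal_is_complete_quoted_string_py := by
  intro expr_str _
  unfold Spec_is_complete_quoted_string_py
  unfold is_complete_quoted_string_py is_complete_quoted_string_py_alt
  by_cases hg : (!((PySem.Str.startswith expr_str "\"" && PySem.Str.endswith expr_str "\"") ||
       (PySem.Str.startswith expr_str "'" && PySem.Str.endswith expr_str "'"))) = true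
  · simp only [hg, if_true]
  · simp only [Bool.not_eq_true] at hg
    simp only [hg, Bool.false_eq_true, if_false]
    rw [PySem.List.slice_to_neg_one]
    exact pvLoopA_eq_split_check _ _
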